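-- pv_equiv track=rewrite | github.com/vsedov/advent-of-code | src/aoc/aoc2022/day_10.py | parse
-- ===== SOURCE A (Python) =====
-- from typing import Tuple
--
-- def parse(txt: str) -> Tuple[int, int]:
--     cycles = 0
--     x_reg = 1
--     sprite = ""
--
--     for i, line in enumerate(txt.split(), start=1):
--         sprite += "".join("#" if abs((i-1) % 40 - x_reg) <= 1 else ".")
--         cycles += i * x_reg if i % 40 == 20 else 0
--         x_reg += int(line) if any(c.isdigit() for c in line) else 0
--
--     return cycles, sprite
-- ===== SOURCE B (Python) =====
-- def parse(txt: str):
--     # Pass 1: build the timeline of register values (value DURING each cycle).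
--     regs = []
--     x = 1
--     for tok in txt.split():
--         regs.append(x)
--         if any(c.isdigit() for c in tok):
--             x += int(tok)
--     # Pass 2: render the sprite from the timeline.
--     sprite = "".join(
--         "#" if abs((i - 1) % 40 - regs[i - 1]) <= 1 else "." for i in range(1, len(regs) + 1)
--     )
--     # Pass 3: signal strengths at cycles 20, 60, 100, ...
--     cycles = sum(i * regs[i - 1] for i in range(1, len(regs) + 1) if i % 40 == 20)
--     return cycles, sprite
-- ===== Notes on version B (the rewrite author's own statement) =====
-- stated objective: alternative
-- what changed: A interleaves pixel drawing, signal summing and register updates in one enumerate loop; B first builds the register timeline in one pass and then renders the sprite and sums the signal strengths in two separate index-based passes over that timeline.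
import Mathlib
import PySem

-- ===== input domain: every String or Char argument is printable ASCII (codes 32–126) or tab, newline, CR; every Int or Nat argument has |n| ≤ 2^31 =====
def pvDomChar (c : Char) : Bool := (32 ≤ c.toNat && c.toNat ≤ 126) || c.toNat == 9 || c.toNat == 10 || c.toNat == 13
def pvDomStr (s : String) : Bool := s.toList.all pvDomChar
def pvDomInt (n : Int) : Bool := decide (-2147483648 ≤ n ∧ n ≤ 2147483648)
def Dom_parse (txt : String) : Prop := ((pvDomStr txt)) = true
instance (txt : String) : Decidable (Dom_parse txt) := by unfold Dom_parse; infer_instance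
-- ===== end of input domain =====

-- B builds the register timeline first, then renders sprite and signal sum in two separate passes (objective: alternative decomposition; same cost).

-- ===== PORT A =====
-- x_reg increment: int(line) if any(c.isdigit() for c in line) else 0
def pvDelta (line : String) : Int :=
  if line.toList.any PySem.Chars.isdigit then (PySem.Int.ofStr? line).getD 0 else 0

-- one iteration of A's loop; state = (cycles, x_reg, sprite as chars)
def pvStepA (st : Int × Int × List Char) (p : Int × String) : Int × Int × List Char :=
  ((if PySem.Int.mod p.1 40 = 20 then st.1 + p.1 * st.2.1 else st.1),
   st.2.1 + pvDelta p.2,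
   st.2.2 ++ [if |PySem.Int.mod (p.1 - 1) 40 - st.2.1| ≤ 1 then '#' else '.'])

def parse (txt : String) : Int × String :=
  let st := (PySem.List.enumerate (PySem.Str.split₀ txt) 1).foldl pvStepA (0, 1, [])
  (st.1, String.ofList st.2.2)

-- ===== PORT B =====
-- pass 1: timeline of register values, one per cycle (returns (regs, final x))
def pvRegsB (toks : List String) : List Int × Int :=
  toks.foldl (fun acc tok => (acc.1 ++ [acc.2], if tok.toList.any PySem.Chars.isdigit then acc.2 + (PySem.Int.ofStr? tok).getD 0 else acc.2)) ([], 1)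

def parse_alt (txt : String) : Int × String :=
  let regs := (pvRegsB (PySem.Str.split₀ txt)).1
  let n : Int := regs.length
  let sprite := (PySem.List.pyRange 1 (n + 1) 1).map
    (fun i => if |PySem.Int.mod (i - 1) 40 - PySem.List.pyGetD regs (i - 1) 0| ≤ 1 then '#' else '.')
  let cycles := (((PySem.List.pyRange 1 (n + 1) 1).filter (fun i => PySem.Int.mod i 40 = 20)).map
    (fun i => i * PySem.List.pyGetD regs (i - 1) 0)).sum
  (cycles, String.ofList sprite)

-- ===== PRECONDITION & SPEC =====
-- Pre_ excludes exactly the inputs where Python's int(token) raises ValueError: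
-- a whitespace-separated token that contains a digit but is not a valid int literal (e.g. "0x10", "a1").
def Pre_parse (txt : String) : Prop :=
  ((PySem.Str.split₀ txt).all
    (fun t => !(t.toList.any PySem.Chars.isdigit) || (PySem.Int.ofStr? t).isSome)) = true
instance (txt : String) : Decidable (Pre_parse txt) := by unfold Pre_parse; infer_instance
def pvWitness_parse : String := "noop addx 3 noop addx -5"
def Spec_parse (txt : String) (out : Int × String) : Prop := out = parse_alt txt
instance (txt : String) (out : Int × String) : Decidable (Spec_parse txt out) := by unfold Spec_parse; infer_instance

-- ===== CLAIM (what is proved, stated in full; the proofs are below) =====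
def Claim_equal_parse : Prop := ∀ (txt : String), Dom_parse txt → Pre_parse txt → Spec_parse txt (parse txt)

-- ===== LEMMAS AND PROOFS =====

-- spec-level timeline and the two renderings, by structural recursion
def pvRegsFrom (toks : List String) (x : Int) : List Int :=
  match toks with
  | [] => []
  | t :: ts => x :: pvRegsFrom ts (x + pvDelta t)

def pvXFinal (toks : List String) (x : Int) : Int :=
  match toks with
  | [] => x
  | t :: ts => pvXFinal ts (x + pvDelta t)

def pvPix (j r : Int) : Char := if |PySem.Int.mod j 40 - r| ≤ 1 then '#' else '.'

def pvSpriteFrom (s : Int) (regs : List Int) : List Char :=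
  match regs with
  | [] => []
  | r :: rs => pvPix (s - 1) r :: pvSpriteFrom (s + 1) rs

def pvCyclesFrom (s : Int) (regs : List Int) : Int :=
  match regs with
  | [] => 0
  | r :: rs => (if PySem.Int.mod s 40 = 20 then s * r else 0) + pvCyclesFrom (s + 1) rs

theorem pvA_key (toks : List String) : ∀ (s c x : Int) (ch : List Char),
    (PySem.List.enumerate toks s).foldl pvStepA (c, x, ch) =
      (c + pvCyclesFrom s (pvRegsFrom toks x),
       pvXFinal toks x,
       ch ++ pvSpriteFrom s (pvRegsFrom toks x)) := by
  induction toks with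
  | nil => intro s c x ch; simp [PySem.List.enumerate_nil, pvRegsFrom, pvXFinal, pvSpriteFrom, pvCyclesFrom]
  | cons t ts ih =>
    intro s c x ch
    rw [PySem.List.enumerate_cons]
    simp only [List.foldl_cons, pvStepA, ih]
    simp only [pvRegsFrom, pvXFinal, pvSpriteFrom, pvCyclesFrom, pvPix, Prod.mk.injEq]
    refine ⟨by split_ifs <;> ring, by simp, by simp⟩

theorem pvB_regs (toks : List String) : ∀ (acc : List Int) (x : Int),
    toks.foldl (fun acc tok => (acc.1 ++ [acc.2], if tok.toList.any PySem.Chars.isdigit then acc.2 + (PySem.Int.ofStr? tok).getD 0 else acc.2)) (acc, x) =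
      (acc ++ pvRegsFrom toks x, pvXFinal toks x) := by
  induction toks with
  | nil => intro acc x; simp [pvRegsFrom, pvXFinal]
  | cons t ts ih =>
    intro acc x
    simp only [List.foldl_cons, ih, pvRegsFrom, pvXFinal, pvDelta]
    split_ifs <;> simp

theorem pvSprite_eq (regs : List Int) : ∀ (j : Int),
    (List.range regs.length).map (fun (k : ℕ) => pvPix (j + (k : ℤ)) (regs.getD k 0)) = pvSpriteFrom (j + 1) regs := by
  induction regs with
  | nil => intro j; simp [pvSpriteFrom]
  | cons r rs ih =>
    intro j
    simp only [List.length_cons]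
    rw [List.range_succ_eq_map]
    simp only [List.map_cons, List.map_map, pvSpriteFrom, List.cons.injEq]
    refine ⟨by norm_num [pvPix], ?_⟩
    rw [← ih (j + 1)]
    apply List.map_congr_left
    intro k _
    simp only [Function.comp, List.getD_cons_succ]
    push_cast
    rw [show j + ((k : ℤ) + 1) = j + 1 + (k : ℤ) from by ring]

theorem pvCycles_eq (regs : List Int) : ∀ (j : Int),
    ((List.range regs.length).map (fun (k : ℕ) => if PySem.Int.mod (j + 1 + (k : ℤ)) 40 = 20 then (j + 1 + (k : ℤ)) * regs.getD k 0 else 0)).sum = pvCyclesFrom (j + 1) regs := by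
  induction regs with
  | nil => intro j; simp [pvCyclesFrom]
  | cons r rs ih =>
    intro j
    simp only [List.length_cons]
    rw [List.range_succ_eq_map]
    simp only [List.map_cons, List.map_map, List.sum_cons, pvCyclesFrom]
    congr 1
    · norm_num
    · rw [← ih (j + 1)]
      apply congrArg
      apply List.map_congr_left
      intro k _
      simp only [Function.comp, List.getD_cons_succ]
      push_cast
      rw [show j + 1 + ((k : ℤ) + 1) = j + 1 + 1 + (k : ℤ) from by ring]

-- sum of a filtered-then-mapped list as a sum of an ite-map
theorem pvSum_filter_map {α : Type} (P : α → Prop) [DecidablePred P] (f : α → Int) (l : List α) :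
    ((l.filter (fun a => decide (P a))).map f).sum = (l.map (fun a => if P a then f a else 0)).sum := by
  induction l with
  | nil => simp
  | cons a l ih =>
    by_cases h : P a <;> simp [h, ih]

theorem pvRange_shift (n : ℕ) : PySem.List.pyRange 1 ((n : Int) + 1) 1 = (List.range n).map (fun (k : ℕ) => 1 + (k : ℤ)) := by
  rw [PySem.List.pyRange_one]
  have h : ((n : Int) + 1 - 1).toNat = n := by omega
  rw [h]

-- ===== VERDICT (by name: the statement is the Claim_ definition above) =====
theorem parse_spec : Claim_equal_parse := by
  intro txt _ _
  unfold Spec_parse parse parse_alt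
  rw [show (pvRegsB (PySem.Str.split₀ txt)) = _ from pvB_regs (PySem.Str.split₀ txt) [] 1]
  rw [pvA_key (PySem.Str.split₀ txt) 1 0 1 []]
  simp only [List.nil_append, zero_add]
  set regs := pvRegsFrom (PySem.Str.split₀ txt) 1 with hregs
  rw [pvRange_shift regs.length]
  simp only [Prod.mk.injEq]
  constructor
  · -- cycles component
    rw [pvSum_filter_map (fun i => PySem.Int.mod i 40 = 20) _ _, List.map_map]
    have hc := pvCycles_eq regs 0
    norm_num at hc
    rw [← hc]
    apply congrArg
    apply List.map_congr_left
    intro k _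
    have h2 : (1 : Int) + (k : Int) - 1 = ((k : ℕ) : Int) := by ring
    simp only [Function.comp, h2, PySem.List.pyGetD_natCast]
    norm_num [PySem.Int.mod_eq_emod_of_pos, List.getD]
  · -- sprite component
    apply congrArg
    rw [List.map_map]
    have hs := pvSprite_eq regs 0
    norm_num at hs
    rw [← hs]
    apply List.map_congr_left
    intro k _
    have h2 : (1 : Int) + (k : Int) - 1 = ((k : ℕ) : Int) := by ring
    simp only [Function.comp, h2, PySem.List.pyGetD_natCast, pvPix]
    norm_num [List.getD]
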